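-- pv_equiv track=rewrite | github.com/mmh132/ProjectEuler | work/P118.py | ntomask
-- ===== SOURCE A (Python) =====
-- def ntomask(n):
--     mask = 0
--     while n:
--         update = 1 << n%10
--         if mask & update: return -1
--         mask += update
--         n//=10
--     if mask&1: return -1
--     return mask >> 1
-- ===== SOURCE B (Python) =====
-- def ntomask(n):
--     if n < 0:
--         return -1
--     digits = []
--     while n:
--         n, d = divmod(n, 10)
--         digits.append(d)
--     if 0 in digits or len(set(digits)) != len(digits):
--         return -1
--     mask = 0
--     for d in digits:
--         mask |= 1 << (d - 1)
--     return mask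
-- ===== Notes on version B (the rewrite author's own statement) =====
-- stated objective: alternative
-- what changed: A interleaves duplicate/zero detection with mask building in one arithmetic loop (the mask itself is the duplicate detector, with a final &1/>>1 fix-up); B rejects negatives up front, materialises the digit list, checks zero-digit and duplicates with a set, and builds the mask in a separate pass shifting by d-1 so no final shift is needed.
import Mathlib
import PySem

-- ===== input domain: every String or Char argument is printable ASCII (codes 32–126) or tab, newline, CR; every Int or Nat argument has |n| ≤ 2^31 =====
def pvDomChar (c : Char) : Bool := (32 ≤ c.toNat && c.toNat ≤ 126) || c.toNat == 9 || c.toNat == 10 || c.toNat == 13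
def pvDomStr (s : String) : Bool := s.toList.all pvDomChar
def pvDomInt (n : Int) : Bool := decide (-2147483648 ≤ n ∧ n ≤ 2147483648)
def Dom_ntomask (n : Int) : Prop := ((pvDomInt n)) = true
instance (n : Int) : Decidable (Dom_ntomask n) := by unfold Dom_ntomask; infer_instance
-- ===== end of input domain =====

-- B replaces A's single interleaved loop (mask doubling as duplicate detector, final &1/>>1 fix-up)
-- by an up-front negative check, a materialised digit list, set-based duplicate/zero checks and a
-- separate mask-building pass shifting by d-1; objective: alternative decomposition, same cost.

-- ===== PORT A =====
-- Needed by the termination argument of A's while-loop: once bit 9 is set into the mask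
-- (the digit-9 update at the floor-division fixpoint n = -1), it is seen as a duplicate.
theorem pv_and512 (x : Nat) : x &&& 512 = if x / 512 % 2 = 1 then 512 else 0 := by
  have h := Nat.and_two_pow x 9
  rw [Nat.testBit_eq_decide_div_mod_eq] at h
  norm_num at h
  rw [h]
  by_cases hx : x / 512 % 2 = 1 <;> simp [hx]

theorem pv_and512' (x : Nat) : 512 &&& x = if x / 512 % 2 = 1 then 512 else 0 := by
  rw [Nat.and_comm]; exact pv_and512 x

theorem pv_band512 (m : Int) (h : PySem.Int.band m 512 = 0) :
    PySem.Int.band (m + 512) 512 ≠ 0 := by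
  unfold PySem.Int.band at h ⊢
  by_cases hm : (0:Int) ≤ m
  · rw [if_pos hm, if_pos (by norm_num : (0:Int) ≤ 512)] at h
    rw [if_pos (by omega : (0:Int) ≤ m + 512), if_pos (by norm_num : (0:Int) ≤ 512)]
    rw [show (Int.toNat 512) = 512 from by decide] at h ⊢
    rw [pv_and512] at h
    rw [show (m + 512).toNat = m.toNat + 512 by omega, pv_and512]
    split at h <;> split <;> omega
  · rw [if_neg hm, if_pos (by norm_num : (0:Int) ≤ 512)] at h
    rw [show (Int.toNat 512) = 512 from by decide] at h
    rw [pv_and512'] at h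
    by_cases hm2 : (0:Int) ≤ m + 512
    · rw [if_pos hm2, if_pos (by norm_num : (0:Int) ≤ 512)]
      rw [show (Int.toNat 512) = 512 from by decide]
      rw [pv_and512]
      have hk : (-m - 1).toNat < 512 := by omega
      split at h <;> split <;> omega
    · rw [if_neg hm2, if_pos (by norm_num : (0:Int) ≤ 512)]
      rw [show (Int.toNat 512) = 512 from by decide]
      rw [show (-(m + 512) - 1).toNat = (-m - 1).toNat - 512 by omega, pv_and512']
      split at h <;> split <;> omega

-- the 'while n:' loop of A; 'none' models the early 'return -1'
def ntomaskLoop (n mask : Int) : Option Int :=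
  if n = 0 then some mask
  else
    let update : Int := (1:Int) <<< (PySem.Int.mod n 10).toNat
    if PySem.Int.band mask update ≠ 0 then none
    else ntomaskLoop (PySem.Int.floordiv n 10) (mask + update)
termination_by 2 * n.natAbs + (if PySem.Int.band mask 512 = 0 then 1 else 0)
decreasing_by
  rename_i hn hb
  have hb' : PySem.Int.band mask ((1:Int) <<< (PySem.Int.mod n 10).toNat) = 0 := not_not.mp hb
  simp only [PySem.Int.floordiv_eq_ediv_of_pos (by norm_num : (0:Int) < 10),
             PySem.Int.mod_eq_emod_of_pos (by norm_num : (0:Int) < 10)] at hb' ⊢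
  by_cases h1 : n = -1
  · subst h1
    simp only [show (((-1:Int) % 10).toNat) = 9 from by decide,
               show ((1:Int) <<< (9:Nat)) = 512 from by decide,
               show ((-1:Int) / 10) = -1 from by decide] at hb' ⊢
    have hne := pv_band512 mask hb'
    rw [if_pos hb', if_neg hne]
    omega
  · have hlt : (n / 10).natAbs < n.natAbs := by omega
    split <;> split <;> omega

def ntomask (n : Int) : Int :=
  match ntomaskLoop n 0 with
  | none => -1
  | some mask => if PySem.Int.band mask 1 ≠ 0 then -1 else mask >>> (1:Nat)

-- ===== PORT B =====
-- digit extraction 'while n: n, d = divmod(n, 10); digits.append(d)'; B only reaches this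
-- loop with n ≥ 0 (negatives were already rejected), where 'while n:' is 'while n > 0:'
def digitsOf (n : Int) : List Int :=
  if _h : 0 < n then PySem.Int.mod n 10 :: digitsOf (PySem.Int.floordiv n 10) else []
termination_by n.toNat
decreasing_by
  rw [PySem.Int.floordiv_eq_ediv_of_pos (by norm_num : (0:Int) < 10)]
  omega

def ntomask_alt (n : Int) : Int :=
  if n < 0 then -1
  else
    let digits := digitsOf n
    if (0:Int) ∈ digits ∨ (PySem.Set.ofList digits).length ≠ digits.length then -1
    else digits.foldl (fun mask d => PySem.Int.bor mask ((1:Int) <<< (d - 1).toNat)) 0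

-- ===== PRECONDITION & SPEC =====
def Spec_ntomask (n : Int) (out : Int) : Prop := out = ntomask_alt n
instance (n : Int) (out : Int) : Decidable (Spec_ntomask n out) := by unfold Spec_ntomask; infer_instance

-- ===== CLAIM (what is proved, stated in full; the proofs are below) =====
def Claim_equal_ntomask : Prop := ∀ (n : Int), Dom_ntomask n → Spec_ntomask n (ntomask n)

-- ===== LEMMAS AND PROOFS =====

-- adding a power of two whose bit is clear sets exactly that bit
theorem pv_testBit_add (d : Nat) : ∀ M e : Nat, M.testBit d = false →
    (M + 2 ^ d).testBit e = (M.testBit e || decide (e = d)) := by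
  induction d with
  | zero =>
    intro M e h
    rw [Nat.testBit_zero] at h
    have hM : M % 2 = 0 := by simpa using h
    cases e with
    | zero => rw [Nat.testBit_zero, Nat.testBit_zero]; simp; omega
    | succ e =>
      rw [Nat.testBit_succ, Nat.testBit_succ]
      have : (M + 2 ^ 0) / 2 = M / 2 := by simp; omega
      rw [this]
      simp
  | succ d ih =>
    intro M e h
    rw [Nat.testBit_succ] at h
    have hpow : (2:Nat) ^ (d + 1) = 2 ^ d * 2 := by rw [pow_succ]
    have hstep : (M + 2 ^ (d + 1)) / 2 = M / 2 + 2 ^ d := by rw [hpow]; omega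
    cases e with
    | zero =>
      rw [Nat.testBit_zero, Nat.testBit_zero]
      have hpar : (M + 2 ^ (d + 1)) % 2 = M % 2 := by rw [hpow]; omega
      rw [hpar]
      simp
    | succ e =>
      rw [Nat.testBit_succ, Nat.testBit_succ, hstep, ih _ _ h]
      simp

theorem pv_add_pow_eq_or (A k : Nat) (h : A.testBit k = false) :
    A + 2 ^ k = A ||| 2 ^ k := by
  apply Nat.eq_of_testBit_eq
  intro i
  rw [Nat.testBit_or, pv_testBit_add k A i h, Nat.testBit_two_pow]
  simp [eq_comm]

theorem pv_digitsOf_bounds : ∀ n : Int, ∀ d ∈ digitsOf n, 0 ≤ d ∧ d < 10 := by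
  intro n
  induction n using digitsOf.induct with
  | case1 n h ih =>
    rw [digitsOf.eq_def, dif_pos h]
    intro d hd
    rcases List.mem_cons.mp hd with h1 | h1
    · subst h1
      exact ⟨PySem.Int.mod_nonneg _ (by norm_num), PySem.Int.mod_lt _ (by norm_num)⟩
    · exact ih d h1
  | case2 n h =>
    rw [digitsOf.eq_def, dif_neg h]
    intro d hd
    simp at hd

-- A's loop returns -1 (none) on every negative n: the floor-division orbit reaches the
-- fixpoint -1 and its repeated digit 9 trips the duplicate test.
theorem pv_loop_neg : ∀ k : Nat, ∀ n mask : Int,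
    2 * n.natAbs + (if PySem.Int.band mask 512 = 0 then 1 else 0) ≤ k → n < 0 →
    ntomaskLoop n mask = none := by
  intro k
  induction k with
  | zero => intro n mask hk hn; omega
  | succ k ih =>
    intro n mask hk hn
    rw [ntomaskLoop.eq_def, if_neg (by omega : ¬ n = 0)]
    dsimp only
    split
    · rfl
    · rename_i hb
      have hb' : PySem.Int.band mask ((1:Int) <<< (PySem.Int.mod n 10).toNat) = 0 :=
        not_not.mp hb
      simp only [PySem.Int.floordiv_eq_ediv_of_pos (by norm_num : (0:Int) < 10),
                 PySem.Int.mod_eq_emod_of_pos (by norm_num : (0:Int) < 10)] at hb' ⊢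
      by_cases h1 : n = -1
      · subst h1
        simp only [show (((-1:Int) % 10).toNat) = 9 from by decide,
                   show ((1:Int) <<< (9:Nat)) = 512 from by decide,
                   show ((-1:Int) / 10) = -1 from by decide] at hb' ⊢
        have hne := pv_band512 mask hb'
        apply ih
        · rw [if_pos hb'] at hk
          rw [if_neg hne]
          omega
        · decide
      · apply ih
        · have hlt : (n / 10).natAbs < n.natAbs := by omega
          split at hk <;> split <;> omega
        · omega

-- characterisation of A's loop on nonnegative n against B's digit list
theorem pv_loop_char : ∀ k : Nat, ∀ n : Int, n.toNat ≤ k → 0 ≤ n → ∀ M : Nat,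
    ntomaskLoop n (M : Int) =
      if (digitsOf n).Nodup ∧ (∀ d ∈ digitsOf n, M.testBit d.toNat = false)
      then some ((M + ((digitsOf n).map (fun d => 2 ^ d.toNat)).sum : Nat) : Int)
      else none := by
  intro k
  induction k with
  | zero =>
    intro n hk hn M
    have hn0 : n = 0 := by omega
    subst hn0
    rw [ntomaskLoop.eq_def, if_pos rfl, digitsOf, dif_neg (by omega : ¬ (0:Int) < 0)]
    simp
  | succ k ih =>
    intro n hk hn M
    by_cases hn0 : n = 0
    · subst hn0
      rw [ntomaskLoop.eq_def, if_pos rfl, digitsOf, dif_neg (by omega : ¬ (0:Int) < 0)]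
      simp
    · have hpos : 0 < n := by omega
      rw [ntomaskLoop.eq_def, if_neg hn0, digitsOf.eq_def, dif_pos hpos]
      dsimp only
      simp only [PySem.Int.mod_eq_emod_of_pos (by norm_num : (0:Int) < 10),
                 PySem.Int.floordiv_eq_ediv_of_pos (by norm_num : (0:Int) < 10)]
      set d : Nat := ((n % 10).toNat) with hd
      have hsh : ((1:Int) <<< d) = ((2 ^ d : Nat) : Int) := by simp [Int.shiftLeft_eq]
      have hband : PySem.Int.band (M : Int) ((1:Int) <<< d) = ((M &&& 2 ^ d : Nat) : Int) := by
        rw [hsh, PySem.Int.band_natCast]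
      have hand : (M &&& 2 ^ d) = (M.testBit d).toNat * 2 ^ d := Nat.and_two_pow M d
      by_cases hbit : M.testBit d = true
      · rw [if_pos]
        · rw [if_neg]
          intro hcon
          have := hcon.2 (n % 10) (List.mem_cons_self)
          have : ((n % 10).toNat) = d := rfl
          simp_all
        · rw [hband, hand, hbit]
          simp
      · have hbit' : M.testBit d = false := by simpa using hbit
        rw [if_neg (by rw [hband, hand, hbit']; simp)]
        have hrec : (n / 10).toNat ≤ k := by omega
        have hM : ((M:Int) + (1:Int) <<< d) = (((M + 2 ^ d) : Nat) : Int) := by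
          rw [hsh]; push_cast; ring
        rw [hM, ih (n / 10) hrec (by omega) (M + 2 ^ d)]
        have hmem : ∀ e ∈ digitsOf (n / 10), 0 ≤ e ∧ e < 10 := pv_digitsOf_bounds _
        have hcond : ((n % 10 :: digitsOf (n / 10)).Nodup ∧
              ∀ e ∈ n % 10 :: digitsOf (n / 10), M.testBit e.toNat = false)
            ↔ ((digitsOf (n / 10)).Nodup ∧
              ∀ e ∈ digitsOf (n / 10), (M + 2 ^ d).testBit e.toNat = false) := by
          constructor
          · rintro ⟨hnd, hall⟩
            rcases List.nodup_cons.mp hnd with ⟨hnotmem, hnd'⟩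
            refine ⟨hnd', fun e he => ?_⟩
            rw [pv_testBit_add d M e.toNat hbit']
            have h1 : M.testBit e.toNat = false := hall e (List.mem_cons_of_mem _ he)
            have h2 : e.toNat ≠ d := by
              intro hcon
              apply hnotmem
              have he0 : 0 ≤ e := (hmem e he).1
              have : e = n % 10 := by omega
              rw [← this]; exact he
            simp [h1, h2]
          · rintro ⟨hnd', hall⟩
            have hnotmem : n % 10 ∉ digitsOf (n / 10) := by
              intro hcon
              have := hall (n % 10) hcon
              rw [pv_testBit_add d M _ hbit'] at this
              simp [hd] at this
            refine ⟨List.nodup_cons.mpr ⟨hnotmem, hnd'⟩, fun e he => ?_⟩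
            rcases List.mem_cons.mp he with h1 | h1
            · subst h1; exact hbit'
            · have := hall e h1
              rw [pv_testBit_add d M _ hbit'] at this
              simp at this
              exact this.1
        by_cases hc : (digitsOf (n / 10)).Nodup ∧
            ∀ e ∈ digitsOf (n / 10), (M + 2 ^ d).testBit e.toNat = false
        · rw [if_pos hc, if_pos (hcond.mpr hc)]
          congr 1
          have : ((n % 10).toNat) = d := rfl
          rw [List.map_cons, List.sum_cons, this]
          push_cast
          ring
        · rw [if_neg hc, if_neg (fun h => hc (hcond.mp h))]

theorem pv_sum_parity : ∀ ds : List Int, ds.Nodup → (∀ d ∈ ds, 0 ≤ d) →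
    ((ds.map (fun d => 2 ^ d.toNat)).sum) % 2 = (if (0:Int) ∈ ds then 1 else 0) := by
  intro ds
  induction ds with
  | nil => simp
  | cons d ds ih =>
    intro hnd hb
    rcases List.nodup_cons.mp hnd with ⟨hnotmem, hnd'⟩
    have ihv := ih hnd' (fun e he => hb e (List.mem_cons_of_mem _ he))
    rw [List.map_cons, List.sum_cons]
    by_cases hd0 : d = 0
    · subst hd0
      rw [if_neg hnotmem] at ihv
      rw [if_pos List.mem_cons_self]
      rw [show Int.toNat 0 = 0 from rfl, pow_zero]
      omega
    · have hpos : 0 < d.toNat := by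
        have := hb d List.mem_cons_self
        omega
      have heven : (2:Nat) ^ d.toNat % 2 = 0 := by
        have : (2:Nat) ^ d.toNat = 2 ^ (d.toNat - 1) * 2 := by
          rw [← pow_succ]
          congr 1
          omega
        omega
      by_cases h0 : (0:Int) ∈ ds
      · rw [if_pos h0] at ihv
        rw [if_pos (List.mem_cons_of_mem _ h0)]
        omega
      · rw [if_neg h0] at ihv
        rw [if_neg (by
          intro hc
          rcases List.mem_cons.mp hc with hc' | hc'
          · exact hd0 hc'.symm
          · exact h0 hc')]
        omega

theorem pv_sum_halve : ∀ ds : List Int, (∀ d ∈ ds, 1 ≤ d) →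
    ((ds.map (fun d => 2 ^ d.toNat)).sum) =
      2 * ((ds.map (fun d => 2 ^ (d - 1).toNat)).sum) := by
  intro ds
  induction ds with
  | nil => simp
  | cons d ds ih =>
    intro hb
    rw [List.map_cons, List.sum_cons, List.map_cons, List.sum_cons,
        ih (fun e he => hb e (List.mem_cons_of_mem _ he))]
    have h1 : d.toNat = (d - 1).toNat + 1 := by
      have := hb d List.mem_cons_self
      omega
    rw [h1, pow_succ]
    ring

theorem pv_foldB : ∀ ds : List Int, ∀ A : Nat, ds.Nodup → (∀ d ∈ ds, 1 ≤ d) →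
    (∀ d ∈ ds, A.testBit (d - 1).toNat = false) →
    ds.foldl (fun mask d => PySem.Int.bor mask ((1:Int) <<< (d - 1).toNat)) (A : Int) =
      ((A + (ds.map (fun d => 2 ^ (d - 1).toNat)).sum : Nat) : Int) := by
  intro ds
  induction ds with
  | nil => intro A _ _ _; simp
  | cons d ds ih =>
    intro A hnd hb hbit
    rcases List.nodup_cons.mp hnd with ⟨hnotmem, hnd'⟩
    have hbitd : A.testBit (d - 1).toNat = false := hbit d List.mem_cons_self
    rw [List.foldl_cons]
    have hsh : ((1:Int) <<< (((d - 1).toNat : Int))) = ((2 ^ (d - 1).toNat : Nat) : Int) :=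
      Int.one_shiftLeft _
    have hstep : PySem.Int.bor (A : Int) ((1:Int) <<< (((d - 1).toNat : Int))) =
        (((A + 2 ^ (d - 1).toNat) : Nat) : Int) := by
      rw [hsh, PySem.Int.bor_natCast, pv_add_pow_eq_or A _ hbitd]
    rw [hstep, ih (A + 2 ^ (d - 1).toNat) hnd'
        (fun e he => hb e (List.mem_cons_of_mem _ he))
        (fun e he => by
          rw [pv_testBit_add _ A _ hbitd]
          have h1 : A.testBit (e - 1).toNat = false := hbit e (List.mem_cons_of_mem _ he)
          have h2 : (e - 1).toNat ≠ (d - 1).toNat := by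
            intro hcon
            apply hnotmem
            have he1 := hb e (List.mem_cons_of_mem _ he)
            have hd1 := hb d List.mem_cons_self
            have : e = d := by omega
            rw [← this]; exact he
          rw [h1]
          simp only [Bool.false_or]
          exact decide_eq_false h2)]
    rw [List.map_cons, List.sum_cons]
    congr 1
    omega

theorem pv_nodup_iff_len (ds : List Int) :
    (PySem.Set.ofList ds).length = ds.length ↔ ds.Nodup := by
  constructor
  · intro h
    have h1 : (PySem.Set.ofList ds).toFinset = ds.toFinset := by
      ext x
      simp [List.mem_toFinset, PySem.Set.mem_ofList]
    have h2 : (PySem.Set.ofList ds).toFinset.card = (PySem.Set.ofList ds).length :=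
      List.toFinset_card_of_nodup (PySem.Set.nodup_ofList ds)
    have h3 : ds.toFinset.card = ds.length := by rw [← h1, h2, h]
    exact Multiset.toFinset_card_eq_card_iff_nodup.mp h3
  · intro h
    rw [PySem.Set.ofList_eq_self_of_nodup ds h]

-- ===== VERDICT (by name: the statement is the Claim_ definition above) =====
theorem ntomask_spec : Claim_equal_ntomask := by
  intro n _
  unfold Spec_ntomask ntomask ntomask_alt
  by_cases hneg : n < 0
  · rw [pv_loop_neg (2 * n.natAbs + 1) n 0 (by split <;> omega) hneg, if_pos hneg]
  · rw [if_neg hneg]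
    have hn : (0:Int) ≤ n := by omega
    rw [show ntomaskLoop n (0:Int) = ntomaskLoop n (((0:Nat)):Int) from rfl,
        pv_loop_char n.toNat n le_rfl hn 0]
    have hbound := pv_digitsOf_bounds n
    by_cases hnd : (digitsOf n).Nodup
    · rw [if_pos ⟨hnd, fun d _ => Nat.zero_testBit _⟩]
      dsimp only
      have hpar := pv_sum_parity (digitsOf n) hnd (fun d hd => (hbound d hd).1)
      set S : Nat := ((digitsOf n).map (fun d => 2 ^ d.toNat)).sum with hS
      have hband : PySem.Int.band ((0 + S : Nat) : Int) 1 = ((S &&& 1 : Nat) : Int) := by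
        rw [show ((1:Int)) = ((1:Nat) : Int) from rfl, PySem.Int.band_natCast,
            Nat.zero_add]
      have hand1 : S &&& 1 = S % 2 := Nat.and_one_is_mod S
      by_cases h0 : (0:Int) ∈ digitsOf n
      · have hcondA : PySem.Int.band ((0 + S : Nat) : Int) 1 ≠ 0 := by
          rw [hband, hand1, hpar, if_pos h0]
          simp
        have hcondB : (0:Int) ∈ digitsOf n ∨
            (PySem.Set.ofList (digitsOf n)).length ≠ (digitsOf n).length := Or.inl h0
        rw [if_pos hcondA, if_pos hcondB]
      · have hcondA : ¬ (PySem.Int.band ((0 + S : Nat) : Int) 1 ≠ 0) := by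
          rw [hband, hand1, hpar, if_neg h0]
          simp
        have hcondB : ¬ ((0:Int) ∈ digitsOf n ∨
            (PySem.Set.ofList (digitsOf n)).length ≠ (digitsOf n).length) := by
          rw [not_or]
          exact ⟨h0, fun h => h ((pv_nodup_iff_len _).mpr hnd)⟩
        rw [if_neg hcondA, if_neg hcondB]
        have hge1 : ∀ d ∈ digitsOf n, 1 ≤ d := by
          intro d hd
          rcases lt_or_eq_of_le (hbound d hd).1 with h | h
          · omega
          · exact absurd (h ▸ hd) h0
        rw [show ((0:Int)) = (((0:Nat)):Int) from rfl,
            pv_foldB (digitsOf n) 0 hnd hge1 (fun d _ => Nat.zero_testBit _)]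
        have hhalf := pv_sum_halve (digitsOf n) hge1
        rw [← Int.natCast_shiftRight, Nat.shiftRight_eq_div_pow]
        congr 1
        omega
    · have hcondB : (0:Int) ∈ digitsOf n ∨
          (PySem.Set.ofList (digitsOf n)).length ≠ (digitsOf n).length :=
        Or.inr (fun h => hnd ((pv_nodup_iff_len _).mp h))
      rw [if_neg (fun h => hnd h.1), if_pos hcondB]
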